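-- pv_equiv track=rewrite | github.com/BigDataWUR/PCSE-Gym | pcse_gym/utils/plotter.py | restructure_x
-- ===== SOURCE A (Python) =====
-- def restructure_x(day_nums):
--     # sanity check
--     # if number resets to 1, add subsequent number with previous so on
--     offset = 0
--     new_num = []
--     for i, n in enumerate(day_nums):
--         if i > 0 and day_nums[i] < day_nums[i - 1]:
--             offset += day_nums[i - 1]
--         new_num.append(n + offset)
--     return new_num
-- ===== SOURCE B (Python) =====
-- def restructure_x(day_nums):
--     # segment decomposition: split into maximal runs at reset points,
--     # then shift each whole run by the sum of the previous runs' final values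
--     segs = []
--     for n in day_nums:
--         if segs and n >= segs[-1][-1]:
--             segs[-1].append(n)
--         else:
--             segs.append([n])
--     out = []
--     off = 0
--     for seg in segs:
--         out.extend(x + off for x in seg)
--         off += seg[-1]
--     return out
-- ===== Notes on version B (the rewrite author's own statement) =====
-- stated objective: alternative
-- what changed: Instead of A's single fused loop carrying a running offset and doing index lookbacks, B first partitions the input into maximal non-resetting runs (a list-of-segments structure), then emits each whole run shifted by the accumulated final values of the preceding runs.
import Mathlib
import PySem

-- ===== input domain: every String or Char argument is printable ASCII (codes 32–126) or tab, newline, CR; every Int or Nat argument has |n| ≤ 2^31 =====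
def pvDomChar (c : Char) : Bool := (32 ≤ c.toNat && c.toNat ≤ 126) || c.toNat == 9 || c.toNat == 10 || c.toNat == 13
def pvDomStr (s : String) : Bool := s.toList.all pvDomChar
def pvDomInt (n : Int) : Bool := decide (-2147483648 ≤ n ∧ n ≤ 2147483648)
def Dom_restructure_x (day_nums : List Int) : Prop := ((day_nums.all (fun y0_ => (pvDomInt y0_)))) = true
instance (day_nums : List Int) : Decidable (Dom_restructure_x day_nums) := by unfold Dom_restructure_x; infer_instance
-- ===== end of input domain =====

-- B replaces A's fused running-offset loop by a segment decomposition: partition into maximal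
-- non-resetting runs, then shift each run by the accumulated final values of earlier runs.
-- ===== PORT A =====
-- loop state (offset, new_num); prev element carried instead of day_nums[i-1] lookup (always in range)
def pvALoop (prev offset : Int) (rest acc : List Int) : List Int :=
  match rest with
  | [] => acc
  | n :: rs =>
    let offset' := if n < prev then offset + prev else offset
    pvALoop n offset' rs (acc ++ [n + offset'])

def restructure_x (day_nums : List Int) : List Int :=
  match day_nums with
  | [] => []
  | n :: rest => pvALoop n 0 rest ([] ++ [n + 0])

-- ===== PORT B =====
-- one step of B's first loop: extend the last segment or start a new one
-- (segments are never empty in Python, so segs[-1][-1] is ported as getLastD 0, exact here)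
def pvBStep (segs : List (List Int)) (n : Int) : List (List Int) :=
  match segs.getLast? with
  | none => segs ++ [[n]]
  | some seg => if seg.getLastD 0 ≤ n then segs.dropLast ++ [seg ++ [n]] else segs ++ [[n]]

def restructure_x_alt (day_nums : List Int) : List Int :=
  let segs := day_nums.foldl pvBStep []
  (segs.foldl
    (fun (a : Int × List Int) seg => (a.1 + seg.getLastD 0, a.2 ++ seg.map (fun x => x + a.1)))
    ((0 : Int), ([] : List Int))).2

-- ===== PRECONDITION & SPEC =====
def Spec_restructure_x (day_nums : List Int) (out : List Int) : Prop := out = restructure_x_alt day_nums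
instance (day_nums : List Int) (out : List Int) : Decidable (Spec_restructure_x day_nums out) := by unfold Spec_restructure_x; infer_instance

-- ===== CLAIM =====
def Claim_equal_restructure_x : Prop := ∀ (day_nums : List Int), Dom_restructure_x day_nums → Spec_restructure_x day_nums (restructure_x day_nums)

-- ===== LEMMAS AND PROOFS =====
-- recursive characterization of B's segment-building fold (proof helper only)
def pvBuild (seg : List Int) (prev : Int) (rest : List Int) : List (List Int) :=
  match rest with
  | [] => [seg]
  | n :: rs => if prev ≤ n then pvBuild (seg ++ [n]) n rs else seg :: pvBuild [n] n rs

theorem pvFoldl_bStep (rest : List Int) (segs : List (List Int)) (seg : List Int) (prev : Int)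
    (h : seg.getLast? = some prev) :
    List.foldl pvBStep (segs ++ [seg]) rest = segs ++ pvBuild seg prev rest := by
  induction rest generalizing segs seg prev with
  | nil => simp [pvBuild]
  | cons n rs ih =>
    have hlast : (segs ++ [seg]).getLast? = some seg := by simp
    have hd : seg.getLastD 0 = prev := by
      cases seg with
      | nil => simp at h
      | cons a l => simp [List.getLastD_eq_getLast?, h]
    by_cases hc : prev ≤ n
    · simp only [List.foldl_cons, pvBStep, hlast, hd, if_pos hc, List.dropLast_concat]
      rw [ih _ _ n (by simp)]
      simp [pvBuild, hc]
    · simp only [List.foldl_cons, pvBStep, hlast, hd, if_neg hc]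
      rw [show segs ++ [seg] ++ [[n]] = (segs ++ [seg]) ++ [[n]] from rfl,
        ih (segs ++ [seg]) [n] n (by simp)]
      simp [pvBuild, hc]

theorem pvConsume_build (rest : List Int) (seg : List Int) (prev offset : Int) (acc : List Int)
    (h : seg.getLast? = some prev) :
    ((pvBuild seg prev rest).foldl
      (fun (a : Int × List Int) s => (a.1 + s.getLastD 0, a.2 ++ s.map (fun x => x + a.1)))
      (offset, acc)).2
    = pvALoop prev offset rest (acc ++ seg.map (fun x => x + offset)) := by
  induction rest generalizing seg prev offset acc with
  | nil => simp [pvBuild, pvALoop]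
  | cons n rs ih =>
    have hd : seg.getLastD 0 = prev := by
      cases seg with
      | nil => simp at h
      | cons a l => simp [List.getLastD_eq_getLast?, h]
    by_cases hc : prev ≤ n
    · have hnc : ¬ n < prev := not_lt.mpr hc
      simp only [pvBuild, if_pos hc, pvALoop, hnc, if_false]
      rw [ih (seg ++ [n]) n offset acc (by simp)]
      simp
    · have hnc : n < prev := not_le.mp hc
      simp only [pvBuild, if_neg hc, pvALoop, hnc, if_true, List.foldl_cons, hd]
      rw [ih [n] n (offset + prev) (acc ++ seg.map (fun x => x + offset)) (by simp)]
      simp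

-- ===== VERDICT =====
theorem restructure_x_spec : Claim_equal_restructure_x := by
  intro day_nums _
  unfold Spec_restructure_x restructure_x restructure_x_alt
  match day_nums with
  | [] => rfl
  | n :: rest =>
    have h0 : List.foldl pvBStep [] (n :: rest) = [] ++ pvBuild [n] n rest := by
      rw [List.foldl_cons,
        show pvBStep [] n = [] ++ [[n]] from by simp [pvBStep]]
      exact pvFoldl_bStep rest [] [n] n (by simp)
    simp only [h0, List.nil_append]
    rw [pvConsume_build rest [n] n 0 [] (by simp)]
    simp
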